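-- pv_equiv track=rewrite | github.com/zhy0504/PubMed-Literature-Push | src/config.py | convert_user_groups_to_keyword_mapping
-- ===== SOURCE A (Python) =====
-- from typing import Dict, Any, List, Tuple, Optional
-- from collections import defaultdict
--
-- def convert_user_groups_to_keyword_mapping(user_groups: List[Dict]) -> Dict[str, List[str]]:
--     """
--     将用户组配置转换为关键词到邮箱的映射。
--
--     Args:
--         user_groups (List[Dict]): 用户组配置列表
--
--     Returns:
--         Dict[str, List[str]]: 关键词到邮箱列表的映射
--     """
--     keyword_to_emails = defaultdict(list)
--
--     for group in user_groups:
--         emails = group.get('emails', [])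
--         keywords = group.get('keywords', [])
--
--         for keyword in keywords:
--             for email in emails:
--                 if email not in keyword_to_emails[keyword]:
--                     keyword_to_emails[keyword].append(email)
--
--     return dict(keyword_to_emails)
-- ===== SOURCE B (Python) =====
-- def convert_user_groups_to_keyword_mapping(user_groups):
--     # Flatten everything into (keyword, email) pairs, then group by keyword
--     # with an ordered dedup per keyword (dict.fromkeys keeps first occurrences).
--     pairs = [(kw, em)
--              for group in user_groups
--              for kw in group.get('keywords', [])
--              for em in group.get('emails', [])]
--     keys = list(dict.fromkeys(kw for kw, _ in pairs))
--     return {k: list(dict.fromkeys(em for kw, em in pairs if kw == k)) for k in keys}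
-- ===== Notes on version B (the rewrite author's own statement) =====
-- stated objective: alternative
-- what changed: Instead of threading a defaultdict with an inner membership-test-and-append through three nested loops, B flattens the groups into one (keyword, email) pair list, takes the first-seen keywords with dict.fromkeys, and maps each keyword to the ordered dedup of its filtered emails.
import Mathlib
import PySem

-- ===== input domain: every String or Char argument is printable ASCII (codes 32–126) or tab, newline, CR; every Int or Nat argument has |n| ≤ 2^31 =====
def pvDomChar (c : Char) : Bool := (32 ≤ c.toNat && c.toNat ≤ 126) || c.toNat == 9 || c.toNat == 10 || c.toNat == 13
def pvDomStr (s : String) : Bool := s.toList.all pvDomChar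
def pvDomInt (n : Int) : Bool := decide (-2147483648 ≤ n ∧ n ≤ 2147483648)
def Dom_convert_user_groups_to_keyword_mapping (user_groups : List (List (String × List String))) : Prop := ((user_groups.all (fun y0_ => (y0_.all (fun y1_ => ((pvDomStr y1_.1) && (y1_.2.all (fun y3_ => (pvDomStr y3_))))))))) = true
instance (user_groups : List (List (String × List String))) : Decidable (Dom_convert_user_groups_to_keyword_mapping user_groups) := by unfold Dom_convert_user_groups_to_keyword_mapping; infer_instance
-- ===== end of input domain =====

-- B flattens the groups into a (keyword, email) pair list, then builds the result by mapping
-- each first-seen keyword to the ordered dedup of its filtered emails — no dict is threaded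
-- through the loops, replacing A's interleaved membership-test-and-append; objective: alternative.


-- ===== PORT A =====
-- Literal port: defaultdict(list); the access keyword_to_emails[keyword] is a setdefault,
-- then append only if the email is not already present; dict(…) at the end is .items.
def convert_user_groups_to_keyword_mapping (user_groups : List (List (String × List String))) : List (String × List String) :=
  (user_groups.foldl (fun d group =>
      let g := PySem.Dict.ofList group
      let emails := g.getD "emails" []
      let keywords := g.getD "keywords" []
      keywords.foldl (fun d kw =>
        emails.foldl (fun d em =>
          let d1 := d.setdefault kw []          -- defaultdict access keyword_to_emails[keyword]
          let cur := d1.getD kw []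
          if em ∈ cur then d1 else d1.insert kw (cur ++ [em])) d) d)
    PySem.Dict.empty).items

-- ===== PORT B =====
-- Literal port of Source B: the triple comprehension building pairs is the nested flatMap/map;
-- list(dict.fromkeys(…)) is PySem.List.dedup; the dict comprehension over keys is the final map.
def pvPairs (user_groups : List (List (String × List String))) : List (String × String) :=
  user_groups.flatMap (fun group =>
    let g := PySem.Dict.ofList group
    (g.getD "keywords" []).flatMap (fun kw =>
      (g.getD "emails" []).map (fun em => (kw, em))))

def convert_user_groups_to_keyword_mapping_alt (user_groups : List (List (String × List String))) : List (String × List String) :=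
  let pairs := pvPairs user_groups
  let keys := PySem.List.dedup (pairs.map Prod.fst)
  keys.map (fun k => (k, PySem.List.dedup ((pairs.filter (fun p => p.1 == k)).map Prod.snd)))

-- ===== PRECONDITION & SPEC =====
def Spec_convert_user_groups_to_keyword_mapping (user_groups : List (List (String × List String))) (out : List (String × List String)) : Prop := out = convert_user_groups_to_keyword_mapping_alt user_groups
instance (user_groups : List (List (String × List String))) (out : List (String × List String)) : Decidable (Spec_convert_user_groups_to_keyword_mapping user_groups out) := by unfold Spec_convert_user_groups_to_keyword_mapping; infer_instance

-- ===== CLAIM (what is proved, stated in full; the proofs are below) =====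
def Claim_equal_convert_user_groups_to_keyword_mapping : Prop := ∀ (user_groups : List (List (String × List String))), Dom_convert_user_groups_to_keyword_mapping user_groups → Spec_convert_user_groups_to_keyword_mapping user_groups (convert_user_groups_to_keyword_mapping user_groups)

-- ===== LEMMAS AND PROOFS =====

-- A's per-(keyword, email) step, as a function of one pair.
def pvStepA (d : PySem.Dict String (List String)) (p : String × String) :
    PySem.Dict String (List String) :=
  let d1 := d.setdefault p.1 []
  let cur := d1.getD p.1 []
  if p.2 ∈ cur then d1 else d1.insert p.1 (cur ++ [p.2])

-- Folding over a flatMap is the nested fold.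
theorem pvFoldl_flatMap {α β γ : Type} (g : α → List β) (f : γ → β → γ) :
    ∀ (l : List α) (init : γ),
      (l.flatMap g).foldl f init = l.foldl (fun acc x => (g x).foldl f acc) init := by
  intro l
  induction l with
  | nil => intro init; rfl
  | cons x xs ih => intro init; simp [List.flatMap_cons, List.foldl_append, ih]

-- A's triple nested fold is exactly a single fold of pvStepA over the flattened pair list.
theorem pvA_eq_foldl_pairs (user_groups : List (List (String × List String))) :
    convert_user_groups_to_keyword_mapping user_groups =
      ((pvPairs user_groups).foldl pvStepA PySem.Dict.empty).items := by
  unfold convert_user_groups_to_keyword_mapping pvPairs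
  rw [pvFoldl_flatMap]
  have hfun : ∀ (d : PySem.Dict String (List String)) (group : List (String × List String)),
      (let g := PySem.Dict.ofList group
       let emails := g.getD "emails" []
       let keywords := g.getD "keywords" []
       keywords.foldl (fun d kw =>
         emails.foldl (fun d em =>
           let d1 := d.setdefault kw []
           let cur := d1.getD kw []
           if em ∈ cur then d1 else d1.insert kw (cur ++ [em])) d) d) =
      ((let g := PySem.Dict.ofList group
        (g.getD "keywords" []).flatMap (fun kw =>
          (g.getD "emails" []).map (fun em => (kw, em)))).foldl pvStepA d) := by
    intro d group
    rw [pvFoldl_flatMap]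
    have hfun2 : ∀ (d' : PySem.Dict String (List String)) (kw : String),
        ((PySem.Dict.ofList group).getD "emails" []).foldl (fun d em =>
          let d1 := d.setdefault kw []
          let cur := d1.getD kw []
          if em ∈ cur then d1 else d1.insert kw (cur ++ [em])) d' =
        (((PySem.Dict.ofList group).getD "emails" []).map (fun em => (kw, em))).foldl pvStepA d' := by
      intro d' kw
      rw [List.foldl_map]
      rfl
    simp only [hfun2]
  simp only [hfun]

theorem pvDedup_nil {α : Type} [BEq α] [LawfulBEq α] (xs : List α)
    (h : PySem.List.dedup xs = []) : xs = [] := by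
  cases xs with
  | nil => rfl
  | cons x xs =>
      exfalso
      have : x ∈ PySem.List.dedup (x :: xs) := by
        rw [PySem.List.mem_dedup]; exact List.mem_cons_self
      rw [h] at this
      exact (List.not_mem_nil) this

-- The fold invariant: the dict's keys are the first-seen keywords of the processed pairs,
-- and each value is the ordered dedup of that keyword's emails among the processed pairs.
def pvInv (ps : List (String × String)) (d : PySem.Dict String (List String)) : Prop :=
  d.keys = PySem.List.dedup (ps.map Prod.fst) ∧
  ∀ k, d.getD k [] = PySem.List.dedup ((ps.filter (fun p => p.1 == k)).map Prod.snd)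

theorem pvInv_step (ps : List (String × String)) (p : String × String)
    (d : PySem.Dict String (List String)) (h : pvInv ps d) :
    pvInv (ps ++ [p]) (pvStepA d p) := by
  obtain ⟨hkeys, hval⟩ := h
  obtain ⟨kw, em⟩ := p
  have hmem : d.contains kw = true ↔ kw ∈ ps.map Prod.fst := by
    rw [PySem.Dict.contains_iff_mem_keys, hkeys, PySem.List.mem_dedup]
  have hfst : PySem.List.dedup ((ps ++ [(kw, em)]).map Prod.fst) =
      PySem.Set.add (PySem.List.dedup (ps.map Prod.fst)) kw := by
    simp [PySem.Set.ofList_append_singleton]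
  have hfself : (ps ++ [(kw, em)]).filter (fun p => p.1 == kw) =
      ps.filter (fun p => p.1 == kw) ++ [(kw, em)] := by
    simp [List.filter_append]
  have hfother : ∀ k, k ≠ kw → (ps ++ [(kw, em)]).filter (fun p => p.1 == k) =
      ps.filter (fun p => p.1 == k) := by
    intro k hk
    have : (kw == k) = false := by simp [Ne.symm hk]
    simp [List.filter_append, this]
  unfold pvStepA
  rcases hc : d.contains kw with _ | _
  · -- fresh keyword
    have hkwnm : kw ∉ ps.map Prod.fst := fun hm => by simp [hmem.mpr hm] at hc
    have hkwnd : kw ∉ PySem.List.dedup (ps.map Prod.fst) := by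
      rw [PySem.List.mem_dedup]; exact hkwnm
    have hv0 : d.getD kw [] = [] := PySem.Dict.getD_of_not_contains d [] hc
    have hflt0 : ps.filter (fun p => p.1 == kw) = [] := by
      have := hval kw
      rw [hv0] at this
      exact List.map_eq_nil_iff.mp (pvDedup_nil _ this.symm)
    have hsd : d.setdefault kw ([] : List String) = d.insert kw [] :=
      PySem.Dict.setdefault_of_not_contains d [] hc
    simp only [hsd, PySem.Dict.getD_insert_self, List.not_mem_nil, if_false, List.nil_append,
      PySem.Dict.insert_insert_self]
    constructor
    · rw [PySem.Dict.keys_insert_of_not_contains d [em] hc, hkeys, hfst,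
        PySem.Set.add_of_not_mem hkwnd]
    · intro k
      rw [PySem.Dict.getD_insert]
      by_cases hk : k = kw
      · subst hk
        rw [if_pos rfl, hfself, hflt0, List.nil_append]
        rfl
      · rw [if_neg hk, hfother k hk]
        exact hval k
  · -- keyword already present
    have hkwd : kw ∈ PySem.List.dedup (ps.map Prod.fst) := by
      rw [PySem.List.mem_dedup]; exact hmem.mp hc
    have hsd : d.setdefault kw ([] : List String) = d :=
      PySem.Dict.setdefault_of_contains d [] hc
    have hded : PySem.List.dedup (((ps.filter (fun p => p.1 == kw)).map Prod.snd) ++ [em]) =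
        if em ∈ d.getD kw [] then d.getD kw [] else d.getD kw [] ++ [em] := by
      rw [hval kw]
      simp only [PySem.List.dedup_eq_ofList, PySem.Set.ofList_append_singleton]
      exact PySem.Set.add_eq_ite _ _
    have hkeysadd : PySem.List.dedup ((ps ++ [(kw, em)]).map Prod.fst) =
        PySem.List.dedup (ps.map Prod.fst) := by
      rw [hfst, PySem.Set.add_of_mem hkwd]
    simp only [hsd]
    by_cases hm : em ∈ d.getD kw []
    · rw [if_pos hm]
      constructor
      · rw [hkeys, hkeysadd]
      · intro k
        by_cases hk : k = kw
        · subst hk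
          rw [hfself, List.map_append, List.map_cons, List.map_nil, hded, if_pos hm]
        · rw [hfother k hk]
          exact hval k
    · rw [if_neg hm]
      constructor
      · rw [PySem.Dict.keys_insert_of_contains d _ hc, hkeys, hkeysadd]
      · intro k
        rw [PySem.Dict.getD_insert]
        by_cases hk : k = kw
        · subst hk
          rw [if_pos rfl, hfself, List.map_append, List.map_cons, List.map_nil, hded, if_neg hm]
        · rw [if_neg hk, hfother k hk]
          exact hval k

theorem pvInv_foldl (ps : List (String × String)) :
    pvInv ps (ps.foldl pvStepA PySem.Dict.empty) := by
  induction ps using List.reverseRecOn with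
  | nil => exact ⟨rfl, fun k => rfl⟩
  | append_singleton ps p ih =>
      rw [List.foldl_append]
      exact pvInv_step ps p _ ih

theorem pvMain (user_groups : List (List (String × List String))) :
    convert_user_groups_to_keyword_mapping user_groups =
      convert_user_groups_to_keyword_mapping_alt user_groups := by
  rw [pvA_eq_foldl_pairs]
  obtain ⟨hkeys, hval⟩ := pvInv_foldl (pvPairs user_groups)
  have hnd : ((pvPairs user_groups).foldl pvStepA PySem.Dict.empty).keys.Nodup := by
    rw [hkeys, PySem.List.dedup_eq_ofList]
    exact PySem.Set.nodup_ofList _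
  unfold convert_user_groups_to_keyword_mapping_alt
  rw [PySem.Dict.items_eq_map_keys _ hnd ([] : List String), hkeys]
  exact List.map_congr_left (fun k _ => by rw [hval k])

-- ===== VERDICT (by name: the statement is the Claim_ definition above) =====
theorem convert_user_groups_to_keyword_mapping_spec : Claim_equal_convert_user_groups_to_keyword_mapping := by
  intro user_groups _
  unfold Spec_convert_user_groups_to_keyword_mapping
  exact pvMain user_groups
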